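-- pv_equiv track=rewrite | github.com/JiwooL0920/leetcode | 실전/Code Signal/Practice/2/[Q3] Construct String Vertical.py | solution
-- ===== SOURCE A (Python) =====
-- def solution(arr):
--     # Find length of longest string
--     longestLength = 0
--     for n in arr:
--         longestLength = max(longestLength, len(n))
--
--     # construct empty matrix
--     matrix = [[False]*longestLength for _ in range(len(arr))]
--     ROWS, COLS = len(matrix), len(matrix[0])
--
--     for r in range(ROWS):
--         for c in range(COLS):
--             if c > len(arr[r])-1:
--                 continue
--             matrix[r][c] = arr[r][c]
--
--     # go by column and construct string
--     s = ""
--     for c in range(COLS):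
--         for r in range(ROWS):
--             char = matrix[r][c]
--             if char != False:
--                 s += char
--     return s
-- ===== SOURCE B (Python) =====
-- def solution(arr):
--     # Per-column buckets filled in row order, single pass over characters, then join.
--     cols = []
--     for s in arr:
--         if len(s) > len(cols):
--             cols.extend([] for _ in range(len(s) - len(cols)))
--         for i, ch in enumerate(s):
--             cols[i].append(ch)
--     return "".join("".join(col) for col in cols)
-- ===== Notes on version B (the rewrite author's own statement) =====
-- stated objective: faster
-- what changed: Replaces the ROWS x maxLen boolean matrix (built and then rescanned column by column) with per-column buckets filled in one row-order pass over the actual characters, then joined.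
import Mathlib
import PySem

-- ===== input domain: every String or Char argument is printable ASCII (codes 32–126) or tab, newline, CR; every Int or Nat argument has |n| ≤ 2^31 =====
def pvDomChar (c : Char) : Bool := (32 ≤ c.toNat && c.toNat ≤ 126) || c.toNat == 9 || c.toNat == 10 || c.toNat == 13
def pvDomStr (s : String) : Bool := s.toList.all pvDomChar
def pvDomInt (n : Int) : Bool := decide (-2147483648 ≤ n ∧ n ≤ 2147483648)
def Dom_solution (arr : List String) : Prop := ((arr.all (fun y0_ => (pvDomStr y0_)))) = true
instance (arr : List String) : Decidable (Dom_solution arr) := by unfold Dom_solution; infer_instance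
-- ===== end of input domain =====

-- B replaces A's ROWS×maxLen matrix with per-column buckets filled in one row-order pass over the characters, then a join (objective: faster).

-- ===== PORT A =====
-- Strings are handled as their character lists (String.ofList at the end); loops are foldl
-- over List.range, matrix cells are Option Char (False = none), exactly A's steps.
def solution (arr : List String) : String :=
  let longestLength := arr.foldl (fun longestLength n => max longestLength n.length) 0
  let matrix : List (List (Option Char)) :=
    (List.range arr.length).map (fun _ => List.replicate longestLength (none : Option Char))
  let ROWS := matrix.length
  let COLS := (matrix.headD []).length  -- matrix[0]: Python raises IndexError when arr = [] (excluded by Pre_)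
  let matrix := (List.range ROWS).foldl (fun matrix (r : Nat) =>
    (List.range COLS).foldl (fun matrix (c : Nat) =>
      if ((c : Int)) > ((arr.getD r "").length : Int) - 1 then matrix
      else matrix.set r ((matrix.getD r []).set c (some ((arr.getD r "").toList.getD c ' ')))) matrix) matrix
  let s : List Char := (List.range COLS).foldl (fun s c =>
    (List.range ROWS).foldl (fun s r =>
      match (matrix.getD r []).getD c none with
      | some char => s ++ [char]
      | none => s) s) []
  String.ofList s

-- ===== PORT B =====
-- Per-column buckets: pad the bucket list to len(s), then append each character of the
-- row to its column's bucket (enumerate = zipIdx); finally join the buckets.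
def solution_alt (arr : List String) : String :=
  let cols : List (List Char) := arr.foldl (fun cols s =>
    let cols := if s.length > cols.length
      then cols ++ List.replicate (s.length - cols.length) ([] : List Char)
      else cols
    (s.toList.zipIdx).foldl (fun cols p => cols.set p.2 ((cols.getD p.2 []) ++ [p.1])) cols)
    []
  String.ofList (PySem.Chars.join [] cols)

-- ===== PRECONDITION & SPEC =====
-- Pre_ excludes only the empty list, on which A raises IndexError (matrix[0]).
def Pre_solution (arr : List String) : Prop := arr ≠ []
instance (arr : List String) : Decidable (Pre_solution arr) := by unfold Pre_solution; infer_instance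
def pvWitness_solution : List String := ["ab", "c"]

def Spec_solution (arr : List String) (out : String) : Prop := out = solution_alt arr
instance (arr : List String) (out : String) : Decidable (Spec_solution arr out) := by unfold Spec_solution; infer_instance

-- ===== CLAIM (what is proved, stated in full; the proofs are below) =====
def Claim_equal_solution : Prop := ∀ (arr : List String), Dom_solution arr → Pre_solution arr → Spec_solution arr (solution arr)

-- ===== LEMMAS AND PROOFS =====

def pvCol (arr : List String) (c : Nat) : List Char := arr.filterMap (fun s => s.toList[c]?)
def pvL (arr : List String) : Nat := arr.foldl (fun l n => max l n.length) 0
def pvCanon (arr : List String) : List (List Char) := (List.range (pvL arr)).map (pvCol arr)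

theorem pvL_bound (arr : List String) (s : String) (h : s ∈ arr) : s.length ≤ pvL arr :=
  (PySem.List.le_foldl_max_nat arr (fun n => n.length) 0).2 s h

theorem pvCol_nil (arr : List String) (c : Nat) (h : pvL arr ≤ c) : pvCol arr c = [] := by
  unfold pvCol
  rw [List.filterMap_eq_nil_iff]
  intro s hs
  have := pvL_bound arr s hs
  rw [List.getElem?_eq_none_iff]
  simp
  omega

theorem join0 (cols : List (List Char)) : PySem.Chars.join [] cols = cols.flatten := by
  induction cols with
  | nil => simp [PySem.Chars.join_nil]
  | cons p rest ih =>
    cases rest with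
    | nil => simp [PySem.Chars.join_singleton]
    | cons q r => rw [PySem.Chars.join_cons_cons] at *; simp_all





-- the per-row step of B
def pvStep (cols : List (List Char)) (s : String) : List (List Char) :=
  let cols := if s.length > cols.length
    then cols ++ List.replicate (s.length - cols.length) ([] : List Char)
    else cols
  (s.toList.zipIdx).foldl (fun cols p => cols.set p.2 ((cols.getD p.2 []) ++ [p.1])) cols

theorem zfold_get? (l : List Char) (k : Nat) (cols : List (List Char)) (j : Nat)
    (hlen : k + l.length ≤ cols.length) :
    ((l.zipIdx k).foldl (fun cols p => cols.set p.2 ((cols.getD p.2 []) ++ [p.1])) cols)[j]? =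
      if k ≤ j ∧ j < k + l.length then some (cols.getD j [] ++ [l.getD (j - k) ' ']) else cols[j]? := by
  induction l generalizing k cols with
  | nil => simp
  | cons ch t ih =>
    simp only [List.zipIdx_cons, List.foldl_cons]
    have hk : k < cols.length := by simp at hlen; omega
    rw [ih (k+1) (cols.set k (cols.getD k [] ++ [ch])) (by simp at hlen ⊢; omega)]
    by_cases h1 : k + 1 ≤ j ∧ j < k + 1 + t.length
    · rw [if_pos h1, if_pos (by simp; omega)]
      have hgd : (cols.set k (cols.getD k [] ++ [ch])).getD j [] = cols.getD j [] := by
        simp only [List.getD, List.getElem?_set]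
        rw [if_neg (by omega)]
      rw [hgd]
      have hjk : j - k = (j - (k+1)) + 1 := by omega
      congr 2
      rw [hjk]
      simp [List.getD]
    · rw [if_neg h1]
      by_cases h2 : k ≤ j ∧ j < k + (ch :: t).length
      · have hjk : j = k := by simp at h1 h2; omega
        subst hjk
        rw [if_pos h2]
        simp [hk, List.getD]
      · rw [if_neg h2, List.getElem?_set]
        have : ¬ k = j := by simp at h1 h2; omega
        simp [this]

theorem pad_eq (p : List String) (s : String) :
    (if s.length > (pvCanon p).length
      then pvCanon p ++ List.replicate (s.length - (pvCanon p).length) ([] : List Char)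
      else pvCanon p) = (List.range (max (pvL p) s.length)).map (pvCol p) := by
  have hl : (pvCanon p).length = pvL p := by simp [pvCanon]
  by_cases h : s.length > (pvCanon p).length
  · rw [if_pos h]
    rw [hl] at h
    have hM : max (pvL p) s.length = pvL p + (s.length - pvL p) := by omega
    rw [hM, List.range_add, List.map_append]
    unfold pvCanon
    congr 1
    symm
    rw [List.eq_replicate_iff]
    refine ⟨by simp, ?_⟩
    intro b hb
    simp only [List.mem_map, List.mem_range] at hb
    obtain ⟨a, ha, hba⟩ := hb
    rw [← hba]
    exact pvCol_nil p _ (by omega)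
  · rw [if_neg h]
    rw [hl] at h
    have : max (pvL p) s.length = pvL p := by omega
    rw [this]; rfl

theorem step_eq (p : List String) (s : String) : pvStep (pvCanon p) s = pvCanon (p ++ [s]) := by
  have hL : pvL (p ++ [s]) = max (pvL p) s.length := by
    unfold pvL; rw [List.foldl_append]; rfl
  unfold pvStep
  simp only []
  rw [pad_eq]
  set M := max (pvL p) s.length with hM
  set cols := (List.range M).map (pvCol p) with hcols
  have hclen : cols.length = M := by simp [hcols]
  have hsl : s.toList.length = s.length := by simp
  apply List.ext_getElem?
  intro j
  rw [zfold_get? _ 0 _ j (by omega)]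
  simp only [Nat.zero_add, Nat.zero_le, true_and, Nat.sub_zero]
  have hRlen : (pvCanon (p ++ [s])).length = M := by simp [pvCanon, hL]
  have hRget : ∀ j, j < M → (pvCanon (p ++ [s]))[j]? = some (pvCol p j ++ (s.toList[j]?).toList) := by
    intro j hj
    unfold pvCanon
    rw [hL]
    rw [List.getElem?_map, List.getElem?_range hj]
    simp only [Option.map_some]
    congr 1
    unfold pvCol
    rw [List.filterMap_append]
    cases h : s.toList[j]? <;> simp [pvCol, h]
  have hcget : ∀ j, j < M → cols.getD j [] = pvCol p j := by
    intro j hj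
    simp [hcols, List.getD, List.getElem?_map, List.getElem?_range hj]
  by_cases h1 : j < s.toList.length
  · rw [if_pos h1]
    rw [hRget j (by omega), hcget j (by omega)]
    congr 1
    rw [List.getElem?_eq_getElem h1]
    simp [List.getD, List.getElem?_eq_getElem h1]
  · rw [if_neg h1]
    by_cases h2 : j < M
    · rw [hRget j h2]
      rw [hcols, List.getElem?_map, List.getElem?_range h2]
      simp only [Option.map_some]
      have : s.toList[j]? = none := by rw [List.getElem?_eq_none_iff]; omega
      rw [this]
      simp
    · have : (pvCanon (p ++ [s]))[j]? = none := by rw [List.getElem?_eq_none_iff]; omega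
      rw [this, List.getElem?_eq_none_iff.2 (by omega)]

theorem bfold_eq (arr : List String) : arr.foldl pvStep [] = pvCanon arr := by
  induction arr using List.reverseRecOn with
  | nil => simp [pvCanon, pvL]
  | append_singleton p s ih => rw [List.foldl_append, List.foldl_cons, List.foldl_nil, ih, step_eq]






-- A's per-row column loop, as a fold on the row alone
def pvRowF (arr : List String) (L : Nat) (r : Nat) (row : List (Option Char)) : List (Option Char) :=
  (List.range L).foldl (fun row (c : Nat) =>
    if ((c : Int)) > ((arr.getD r "").length : Int) - 1 then row
    else row.set c (some ((arr.getD r "").toList.getD c ' '))) row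

theorem getD_eq_of_getElem?_some {α : Type} (l : List α) (n : Nat) (d x : α) (h : l[n]? = some x) :
    l.getD n d = x := by
  simp [List.getD, h]

theorem getD_congr {α : Type} (l1 l2 : List α) (n : Nat) (d : α) (h : l1[n]? = l2[n]?) :
    l1.getD n d = l2.getD n d := by
  simp [List.getD, h]

theorem getD_set_self {α : Type} (m : List α) (r : Nat) (x d : α) (h : r < m.length) :
    (m.set r x).getD r d = x := by
  simp [List.getD, h]

theorem pvRowF_length (arr : List String) (L r : Nat) (row : List (Option Char)) :
    (pvRowF arr L r row).length = row.length := by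
  unfold pvRowF
  induction L with
  | zero => simp
  | succ k ih =>
    rw [List.range_succ, List.foldl_append, List.foldl_cons, List.foldl_nil]
    by_cases hc : ((k : Int)) > ((arr.getD r "").length : Int) - 1
    · rw [if_pos hc, ih]
    · rw [if_neg hc, List.length_set, ih]

theorem pvRowF_get? (arr : List String) (r : Nat) :
    ∀ (L : Nat) (row : List (Option Char)) (c : Nat), L ≤ row.length →
    (pvRowF arr L r row)[c]? =
      if c < L ∧ c < (arr.getD r "").length then some (some ((arr.getD r "").toList.getD c ' '))
      else row[c]? := by
  intro L
  induction L with
  | zero => intro row c _; simp [pvRowF]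
  | succ k ih =>
    intro row c hle
    unfold pvRowF at *
    rw [List.range_succ, List.foldl_append, List.foldl_cons, List.foldl_nil]
    by_cases hc : ((k : Int)) > ((arr.getD r "").length : Int) - 1
    · rw [if_pos hc, ih row c (by omega)]
      have : ¬ ((arr.getD r "").length : Int) - 1 < (k : Int) → False := fun h => h hc
      by_cases h1 : c < k ∧ c < (arr.getD r "").length
      · rw [if_pos h1, if_pos ⟨by omega, h1.2⟩]
      · rw [if_neg h1, if_neg (by omega)]
    · rw [if_neg hc]
      push_cast at hc
      rw [List.getElem?_set]
      by_cases hck : k = c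
      · subst hck
        rw [if_pos rfl]
        have hl : ((List.range k).foldl (fun row (c : Nat) =>
            if ((c : Int)) > ((arr.getD r "").length : Int) - 1 then row
            else row.set c (some ((arr.getD r "").toList.getD c ' '))) row).length = row.length :=
          pvRowF_length arr k r row
        rw [if_pos (by omega)]
        rw [if_pos ⟨by omega, by omega⟩]
      · rw [if_neg hck, ih row c (by omega)]
        by_cases h1 : c < k ∧ c < (arr.getD r "").length
        · rw [if_pos h1, if_pos ⟨by omega, h1.2⟩]
        · rw [if_neg h1, if_neg (by omega)]

-- the inner column loop on the whole matrix only rewrites row r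
theorem inner_eq_set (arr : List String) (r : Nat) :
    ∀ (l : List Nat) (m : List (List (Option Char))), r < m.length →
    l.foldl (fun m (c : Nat) =>
      if ((c : Int)) > ((arr.getD r "").length : Int) - 1 then m
      else m.set r ((m.getD r []).set c (some ((arr.getD r "").toList.getD c ' ')))) m =
    m.set r (l.foldl (fun row (c : Nat) =>
      if ((c : Int)) > ((arr.getD r "").length : Int) - 1 then row
      else row.set c (some ((arr.getD r "").toList.getD c ' '))) (m.getD r [])) := by
  intro l
  induction l with
  | nil =>
    intro m hm
    simp only [List.foldl_nil]
    apply List.ext_getElem?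
    intro j
    rw [List.getElem?_set]
    by_cases hj : r = j
    · subst hj
      rw [if_pos rfl, if_pos hm]
      simp only [List.getD]
      cases h : m[r]? with
      | none => rw [List.getElem?_eq_none_iff] at h; omega
      | some v => simp
    · simp [hj]
  | cons c t ih =>
    intro m hm
    simp only [List.foldl_cons]
    by_cases hc : ((c : Int)) > ((arr.getD r "").length : Int) - 1
    · rw [if_pos hc, if_pos hc, ih m hm]
    · rw [if_neg hc, if_neg hc, ih _ (by simp [hm])]
      rw [List.set_set, getD_set_self _ _ _ _ hm]

-- length invariants
theorem inner_length (arr : List String) (r : Nat) (l : List Nat) (m : List (List (Option Char))) :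
    (l.foldl (fun m (c : Nat) =>
      if ((c : Int)) > ((arr.getD r "").length : Int) - 1 then m
      else m.set r ((m.getD r []).set c (some ((arr.getD r "").toList.getD c ' ')))) m).length = m.length := by
  induction l generalizing m with
  | nil => rfl
  | cons c t ih =>
    simp only [List.foldl_cons]
    by_cases hc : ((c : Int)) > ((arr.getD r "").length : Int) - 1
    · rw [if_pos hc, ih]
    · rw [if_neg hc, ih, List.length_set]

theorem outer_length (arr : List String) (L : Nat) (k : Nat) (m : List (List (Option Char))) :
    ((List.range k).foldl (fun m (r : Nat) =>
      (List.range L).foldl (fun m (c : Nat) =>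
        if ((c : Int)) > ((arr.getD r "").length : Int) - 1 then m
        else m.set r ((m.getD r []).set c (some ((arr.getD r "").toList.getD c ' ')))) m) m).length = m.length := by
  induction k with
  | zero => rfl
  | succ k ih =>
    rw [List.range_succ, List.foldl_append, List.foldl_cons, List.foldl_nil, inner_length, ih]

-- the outer row loop, pointwise
theorem outer_get? (arr : List String) (L : Nat) :
    ∀ (k : Nat), ∀ (m : List (List (Option Char))), k ≤ m.length → ∀ (j : Nat),
    ((List.range k).foldl (fun m (r : Nat) =>
      (List.range L).foldl (fun m (c : Nat) =>
        if ((c : Int)) > ((arr.getD r "").length : Int) - 1 then m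
        else m.set r ((m.getD r []).set c (some ((arr.getD r "").toList.getD c ' ')))) m) m)[j]? =
      if j < k then some (pvRowF arr L j (m.getD j [])) else m[j]? := by
  intro k
  induction k with
  | zero => intro m _ j; simp
  | succ k ih =>
    intro m hk j
    rw [List.range_succ, List.foldl_append, List.foldl_cons, List.foldl_nil]
    have hML : ((List.range k).foldl (fun m (r : Nat) =>
      (List.range L).foldl (fun m (c : Nat) =>
        if ((c : Int)) > ((arr.getD r "").length : Int) - 1 then m
        else m.set r ((m.getD r []).set c (some ((arr.getD r "").toList.getD c ' ')))) m) m).length = m.length :=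
      outer_length arr L k m
    rw [inner_eq_set arr k _ _ (by omega)]
    have hMk : ((List.range k).foldl (fun m (r : Nat) =>
      (List.range L).foldl (fun m (c : Nat) =>
        if ((c : Int)) > ((arr.getD r "").length : Int) - 1 then m
        else m.set r ((m.getD r []).set c (some ((arr.getD r "").toList.getD c ' ')))) m) m).getD k [] = m.getD k [] := by
      apply getD_congr
      rw [ih m (by omega) k, if_neg (by omega)]
    rw [hMk]
    rw [List.getElem?_set]
    by_cases hjk : k = j
    · subst hjk
      rw [if_pos rfl, if_pos (by omega), if_pos (by omega)]
      rfl
    · rw [if_neg hjk, ih m (by omega) j]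
      by_cases h1 : j < k
      · rw [if_pos h1, if_pos (by omega)]
      · rw [if_neg h1, if_neg (by omega)]

-- the finished matrix entry, read as A's string loop reads it
theorem entry_eq (arr : List String) (r c : Nat) (hr : r < arr.length) (hc : c < pvL arr) :
    ((((List.range arr.length).foldl (fun m (r : Nat) =>
      (List.range (pvL arr)).foldl (fun m (c : Nat) =>
        if ((c : Int)) > ((arr.getD r "").length : Int) - 1 then m
        else m.set r ((m.getD r []).set c (some ((arr.getD r "").toList.getD c ' ')))) m)
      ((List.range arr.length).map (fun _ => List.replicate (pvL arr) (none : Option Char))))).getD r []).getD c none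
    = (arr.getD r "").toList[c]? := by
  have hm0 : ((List.range arr.length).map (fun _ => List.replicate (pvL arr) (none : Option Char))).getD r []
      = List.replicate (pvL arr) (none : Option Char) := by
    apply getD_eq_of_getElem?_some
    rw [List.getElem?_map, List.getElem?_range hr]
    rfl
  have h2 := outer_get? arr (pvL arr) arr.length
    ((List.range arr.length).map (fun _ => List.replicate (pvL arr) (none : Option Char))) (by simp) r
  rw [if_pos hr, hm0] at h2
  rw [getD_eq_of_getElem?_some _ _ _ _ h2]
  have h3 := pvRowF_get? arr r (pvL arr) (List.replicate (pvL arr) (none : Option Char)) c (by simp)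
  by_cases h1 : c < (arr.getD r "").length
  · rw [if_pos ⟨hc, h1⟩] at h3
    rw [getD_eq_of_getElem?_some _ _ _ _ h3]
    have hcl : c < (arr.getD r "").toList.length := by simpa [List.getD] using h1
    rw [List.getElem?_eq_getElem hcl, List.getD_eq_getElem _ _ hcl]
  · rw [if_neg (by omega), List.getElem?_replicate, if_pos hc] at h3
    rw [getD_eq_of_getElem?_some _ _ _ _ h3]
    rw [List.getElem?_eq_none_iff.2 (by simp [List.getD] at h1 ⊢; omega)]

-- range-indexed fold over a list is a fold over the list
theorem foldl_range_getD {α β : Type} (xs : List α) (d : α) (g : β → α → β) :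
    ∀ (n : Nat), n ≤ xs.length → ∀ (init : β),
    (List.range n).foldl (fun b i => g b (xs.getD i d)) init = (xs.take n).foldl g init := by
  intro n
  induction n with
  | zero => intro _ init; simp
  | succ k ih =>
    intro h init
    rw [List.range_succ, List.foldl_append, List.foldl_cons, List.foldl_nil, ih (by omega)]
    rw [List.take_succ, List.foldl_append]
    rw [List.getElem?_eq_getElem (by omega)]
    simp [List.getD, List.getElem?_eq_getElem (show k < xs.length by omega)]

-- the row scan of one column appends that column's characters
theorem col_scan (arr : List String) (c : Nat) :
    ∀ (s0 : List Char),
    arr.foldl (fun s x =>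
      match x.toList[c]? with
      | some char => s ++ [char]
      | none => s) s0 = s0 ++ pvCol arr c := by
  induction arr with
  | nil => intro s0; simp [pvCol]
  | cons x t ih =>
    intro s0
    simp only [List.foldl_cons]
    cases h : x.toList[c]? with
    | none => rw [ih]; simp [pvCol, List.filterMap_cons, h]
    | some ch => rw [ih]; simp [pvCol, List.filterMap_cons, h]

theorem COLS_eq (arr : List String) :
    (((List.range arr.length).map (fun _ => List.replicate (pvL arr) (none : Option Char))).headD []).length = pvL arr := by
  cases arr with
  | nil => rfl
  | cons x t =>
    rw [List.length_cons, List.range_succ_eq_map, List.map_cons, List.headD_cons, List.length_replicate]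

theorem A_eq (arr : List String) : solution arr = String.ofList (pvCanon arr).flatten := by
  unfold solution
  dsimp only
  rw [show (List.foldl (fun longestLength n => max longestLength n.length) 0 arr) = pvL arr from rfl]
  rw [COLS_eq, List.length_map, List.length_range]
  congr 1
  rw [PySem.List.foldl_congr_mem (List.range (pvL arr)) _ (fun s c => s ++ pvCol arr c) []
    (by
      intro acc c hc
      rw [List.mem_range] at hc
      rw [PySem.List.foldl_congr_mem (List.range arr.length) _
        (fun s r => match (arr.getD r "").toList[c]? with
          | some char => s ++ [char]
          | none => s) acc
        (by
          intro acc' r hr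
          rw [List.mem_range] at hr
          rw [entry_eq arr r c hr hc])]
      rw [foldl_range_getD arr ""
        (fun s x => match x.toList[c]? with
          | some char => s ++ [char]
          | none => s) arr.length (Nat.le_refl _) acc]
      rw [List.take_length]
      exact col_scan arr c acc)]
  rw [PySem.List.foldl_append_eq_flatMap (pvCol arr) (List.range (pvL arr)) []]
  rw [List.flatMap_def]
  rfl

theorem B_eq (arr : List String) : solution_alt arr = String.ofList (pvCanon arr).flatten := by
  unfold solution_alt
  dsimp only
  rw [show (arr.foldl (fun cols s =>
      (s.toList.zipIdx).foldl (fun cols p => cols.set p.2 ((cols.getD p.2 []) ++ [p.1]))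
        (if s.length > cols.length
          then cols ++ List.replicate (s.length - cols.length) ([] : List Char)
          else cols)) []) = arr.foldl pvStep [] from rfl]
  rw [bfold_eq, join0]

-- ===== VERDICT (by name: the statement is the Claim_ definition above) =====
theorem solution_spec : Claim_equal_solution := by
  intro arr _ _
  unfold Spec_solution
  rw [A_eq, B_eq]
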